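-- pv_equiv track=rewrite | github.com/sofiapapad90/VarCoPP | training_data/VarCoPP_cross_validation.py | stratified_gene_pair_groups
-- ===== SOURCE A (Python) =====
-- def stratified_gene_pair_groups(set_dict, instance_keys):
--     ''' Function that takes a dictionary (set_dict) with keys and all information about
--     instances (including the key 'pair' that contains a tuple with the pair of genes),
--     and a list of the keys that correspond to instances (in the same order as the instances)
--     are present in the set.
--
--     Returns an array that corresponds to numbers based on the unique gene pair each instance
--     belongs to, in the same order as these instances appear in the instance set'''
--
--     # list with pair group number
--     paired_groups = []
--
--     # pair_group number dictionary
--     pair_num_dict = {}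
--
--     # iterate over the instances
--     for i in range(len(instance_keys)):
--         key = instance_keys[i]
--         # add pairs in dictionaries
--         geneA, geneB = set_dict[key]['pair']
--         pair_num_dict[(geneA, geneB)] = 0
--
--     ############ enumerate pairs
--     i = 1
--     for key in pair_num_dict:
--         pair_num_dict[key] = i
--
--         i += 1
--
--     # create dictionary with keys and group number
--     for key in instance_keys:
--         geneA, geneB = set_dict[key]['pair']
--         paired_groups += [pair_num_dict[(geneA, geneB)]]
--
--     return paired_groups
-- ===== SOURCE B (Python) =====
-- def stratified_gene_pair_groups(set_dict, instance_keys):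
--     '''Single pass: assign each unique gene pair its 1-based first-seen number
--     on the fly and emit the number for every instance.'''
--     pair_num_dict = {}
--     paired_groups = []
--     next_num = 1
--     for key in instance_keys:
--         geneA, geneB = set_dict[key]['pair']
--         num = pair_num_dict.get((geneA, geneB))
--         if num is None:
--             num = next_num
--             pair_num_dict[(geneA, geneB)] = num
--             next_num += 1
--         paired_groups.append(num)
--     return paired_groups
-- ===== Notes on version B (the rewrite author's own statement) =====
-- stated objective: simpler
-- what changed: Replaces A's three passes (collect pairs into a zero-valued dict, enumerate the dict to number the pairs, then re-scan the instances to look the numbers up) with a single loop that assigns each unique gene pair its 1-based number on first encounter and emits the number immediately.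
import Mathlib
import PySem

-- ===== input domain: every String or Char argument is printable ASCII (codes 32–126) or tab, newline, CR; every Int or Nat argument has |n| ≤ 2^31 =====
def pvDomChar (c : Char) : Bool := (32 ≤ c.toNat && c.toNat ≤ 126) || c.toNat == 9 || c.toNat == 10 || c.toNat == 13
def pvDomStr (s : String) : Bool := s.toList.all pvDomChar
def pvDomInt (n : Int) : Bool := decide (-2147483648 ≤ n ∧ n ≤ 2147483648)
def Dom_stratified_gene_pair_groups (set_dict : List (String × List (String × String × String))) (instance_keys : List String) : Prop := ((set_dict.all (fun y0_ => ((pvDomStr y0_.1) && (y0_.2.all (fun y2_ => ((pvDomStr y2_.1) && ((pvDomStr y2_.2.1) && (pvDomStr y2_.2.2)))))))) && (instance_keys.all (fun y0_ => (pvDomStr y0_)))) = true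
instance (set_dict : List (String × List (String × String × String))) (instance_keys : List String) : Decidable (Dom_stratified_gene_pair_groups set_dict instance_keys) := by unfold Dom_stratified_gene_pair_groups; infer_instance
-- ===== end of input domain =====

-- B collapses A's three passes into one loop that numbers each unique gene pair on first
-- encounter (objective: simpler); the proof is about the return value only.

-- set_dict[key]['pair'] (Python dict semantics: last duplicate key wins); none = KeyError,
-- excluded by Pre_; the '.getD ("", "")' default in the ports is never reached under Pre_.
def pvLookupPair? (set_dict : List (String × List (String × String × String))) (key : String) : Option (String × String) :=
  match (PySem.Dict.ofList set_dict).get? key with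
  | none => none
  | some inner => (PySem.Dict.ofList inner).get? "pair"

-- ===== PORT A =====
def stratified_gene_pair_groups (set_dict : List (String × List (String × String × String))) (instance_keys : List String) : List Int :=
  -- pass 1: pair_num_dict[(geneA, geneB)] = 0 for each instance
  let pnd := instance_keys.foldl
    (fun (d : PySem.Dict (String × String) Int) key =>
      d.insert ((pvLookupPair? set_dict key).getD ("", "")) 0)
    PySem.Dict.empty
  -- pass 2: i = 1; for key in pair_num_dict: pair_num_dict[key] = i; i += 1
  let pnd2 := (pnd.keys.foldl
    (fun (st : PySem.Dict (String × String) Int × Int) k => (st.1.insert k st.2, st.2 + 1))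
    (pnd, 1)).1
  -- pass 3: paired_groups += [pair_num_dict[(geneA, geneB)]]
  instance_keys.foldl
    (fun acc key => acc ++ [pnd2.getD ((pvLookupPair? set_dict key).getD ("", "")) 0]) []

-- ===== PORT B =====
def stratified_gene_pair_groups_alt (set_dict : List (String × List (String × String × String))) (instance_keys : List String) : List Int :=
  -- one pass: state = (pair_num_dict, next_num, paired_groups)
  (instance_keys.foldl
    (fun (st : PySem.Dict (String × String) Int × Int × List Int) key =>
      let p := (pvLookupPair? set_dict key).getD ("", "")
      match st.1.get? p with
      | some n => (st.1, st.2.1, st.2.2 ++ [n])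
      | none => (st.1.insert p st.2.1, st.2.1 + 1, st.2.2 ++ [st.2.1]))
    (PySem.Dict.empty, 1, [])).2.2

-- ===== PRECONDITION & SPEC =====
-- Pre_ excludes exactly the inputs where Python A raises KeyError: an instance key missing
-- from set_dict, or its record lacking a 'pair' field.
def Pre_stratified_gene_pair_groups (set_dict : List (String × List (String × String × String))) (instance_keys : List String) : Prop :=
  ∀ key ∈ instance_keys, (pvLookupPair? set_dict key).isSome = true
instance (set_dict : List (String × List (String × String × String))) (instance_keys : List String) : Decidable (Pre_stratified_gene_pair_groups set_dict instance_keys) := by unfold Pre_stratified_gene_pair_groups; infer_instance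
def pvWitness_stratified_gene_pair_groups : (List (String × List (String × String × String))) × List String :=
  ([("k1", [("pair", ("BRCA1", "TP53"))]), ("k2", [("pair", ("BRCA1", "ATM"))])], ["k1", "k2", "k1"])

def Spec_stratified_gene_pair_groups (set_dict : List (String × List (String × String × String))) (instance_keys : List String) (out : List Int) : Prop := out = stratified_gene_pair_groups_alt set_dict instance_keys
instance (set_dict : List (String × List (String × String × String))) (instance_keys : List String) (out : List Int) : Decidable (Spec_stratified_gene_pair_groups set_dict instance_keys out) := by unfold Spec_stratified_gene_pair_groups; infer_instance

-- ===== CLAIM (what is proved, stated in full; the proofs are below) =====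
def Claim_equal_stratified_gene_pair_groups : Prop := ∀ (set_dict : List (String × List (String × String × String))) (instance_keys : List String), Dom_stratified_gene_pair_groups set_dict instance_keys → Pre_stratified_gene_pair_groups set_dict instance_keys → Spec_stratified_gene_pair_groups set_dict instance_keys (stratified_gene_pair_groups set_dict instance_keys)

-- ===== LEMMAS AND PROOFS =====

-- index of an element of s is unchanged by Set.update
lemma idxOf_set_update {α : Type} [BEq α] [LawfulBEq α] [DecidableEq α] (s : PySem.Set α) (l : List α)
    (x : α) (hx : x ∈ s) : (PySem.Set.update s l).idxOf x = s.idxOf x := by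
  rw [PySem.Set.update_eq_append_filter]
  exact List.idxOf_append_of_mem hx

-- A's second pass leaves the value at a key not in L untouched
lemma enum_skip {α : Type} [BEq α] [LawfulBEq α] [DecidableEq α] (L : List α) (p : α) :
    p ∉ L → ∀ (d : PySem.Dict α Int) (i : Int),
      ((L.foldl (fun (st : PySem.Dict α Int × Int) k => (st.1.insert k st.2, st.2 + 1)) (d, i)).1).getD p 0
        = d.getD p 0 := by
  induction L with
  | nil => intro _ d i; simp
  | cons a t iht =>
    intro h d i
    simp only [List.foldl_cons]
    rw [iht (fun hm => h (List.mem_cons_of_mem _ hm)) (d.insert a i) (i + 1)]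
    rw [PySem.Dict.getD_insert]
    have hpa : p ≠ a := fun he => h (by simp [he])
    simp [hpa]

-- A's second pass: the resulting value at p is i + (position of p in L), for p ∈ L
lemma enumerate_getD {α : Type} [BEq α] [LawfulBEq α] [DecidableEq α] (L : List α) (p : α) :
    L.Nodup → p ∈ L → ∀ (d : PySem.Dict α Int) (i : Int),
      ((L.foldl (fun (st : PySem.Dict α Int × Int) k => (st.1.insert k st.2, st.2 + 1)) (d, i)).1).getD p 0
        = i + (L.idxOf p : Int) := by
  induction L with
  | nil => intro _ h; cases h
  | cons k L' ih =>
    intro hnd hp d i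
    simp only [List.foldl_cons]
    rcases List.nodup_cons.mp hnd with ⟨hk, hnd'⟩
    by_cases hpk : p = k
    · subst hpk
      rw [enum_skip L' p hk (d.insert p i) (i + 1)]
      rw [PySem.Dict.getD_insert]
      simp
    · have hp' : p ∈ L' := by
        rcases List.mem_cons.mp hp with h | h
        · exact absurd h hpk
        · exact h
      rw [ih hnd' hp' (d.insert k i) (i + 1)]
      have : (k :: L').idxOf p = L'.idxOf p + 1 := by
        simp [hpk, Ne.symm]
      rw [this]
      push_cast
      ring

-- B's loop invariant: from a dict whose value at each of its keys is 1 + its position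
-- among the keys, and counter = number of keys + 1
lemma alt_loop {α : Type} [BEq α] [LawfulBEq α] [DecidableEq α] (t : List α)
    (d : PySem.Dict α Int) (acc : List Int) (hnd : d.keys.Nodup)
    (hget : ∀ q ∈ d.keys, d.get? q = some (1 + (d.keys.idxOf q : Int))) :
    (t.foldl (fun (st : PySem.Dict α Int × Int × List Int) p =>
        match st.1.get? p with
        | some n => (st.1, st.2.1, st.2.2 ++ [n])
        | none => (st.1.insert p st.2.1, st.2.1 + 1, st.2.2 ++ [st.2.1]))
      (d, (d.keys.length : Int) + 1, acc)).2.2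
    = acc ++ t.map (fun p => 1 + ((PySem.Set.update d.keys t).idxOf p : Int)) := by
  induction t generalizing d acc with
  | nil => simp
  | cons p t' ih =>
    simp only [List.foldl_cons, List.map_cons]
    by_cases hp : p ∈ d.keys
    · rw [hget p hp]
      rw [ih d (acc ++ [1 + (d.keys.idxOf p : Int)]) hnd hget]
      have hupd : PySem.Set.update d.keys (p :: t') = PySem.Set.update d.keys t' := by
        rw [PySem.Set.update_cons, PySem.Set.add_of_mem hp]
      rw [hupd, idxOf_set_update d.keys t' p hp]
      simp
    · have hnone : d.get? p = none := by
        rw [PySem.Dict.get?_eq_none_iff_not_mem_keys]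
        exact hp
      rw [hnone]
      have hcont : d.contains p = false := by
        rw [PySem.Dict.contains_eq_decide_mem_keys]
        simp [hp]
      have hkeys : (d.insert p ((d.keys.length : Int) + 1)).keys = d.keys ++ [p] := by
        rw [PySem.Dict.keys_insert_of_not_contains]
        exact hcont
      have hnd2 : (d.insert p ((d.keys.length : Int) + 1)).keys.Nodup := by
        rw [hkeys]
        exact List.Nodup.append hnd (List.nodup_singleton p)
          (fun a ha hb => hp ((List.mem_singleton.mp hb) ▸ ha))
      have hget2 : ∀ q ∈ (d.insert p ((d.keys.length : Int) + 1)).keys,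
          (d.insert p ((d.keys.length : Int) + 1)).get? q
            = some (1 + ((d.insert p ((d.keys.length : Int) + 1)).keys.idxOf q : Int)) := by
        intro q hq
        rw [hkeys] at hq ⊢
        rw [PySem.Dict.get?_insert]
        rcases List.mem_append.mp hq with hq | hq
        · have hqp : q ≠ p := fun he => hp (he ▸ hq)
          rw [if_neg hqp, hget q hq, List.idxOf_append_of_mem hq]
        · have hq : q = p := by simpa using hq
          subst hq
          rw [if_pos rfl, List.idxOf_append_of_notMem hp]
          simp
          omega
      have hlen : ((d.insert p ((d.keys.length : Int) + 1)).keys.length : Int) + 1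
          = (d.keys.length : Int) + 1 + 1 := by
        rw [hkeys]
        simp only [List.length_append, List.length_singleton]
        push_cast
        ring
      have hih := ih (d.insert p ((d.keys.length : Int) + 1))
        (acc ++ [(d.keys.length : Int) + 1]) hnd2 hget2
      rw [hlen] at hih
      rw [hih]
      have hupd : PySem.Set.update d.keys (p :: t')
          = PySem.Set.update (d.keys ++ [p]) t' := by
        rw [PySem.Set.update_cons, PySem.Set.add_of_not_mem hp]
      rw [hupd, hkeys]
      have hmem : p ∈ d.keys ++ [p] := by simp
      rw [idxOf_set_update _ t' p hmem]
      have hidx : ((d.keys ++ [p]).idxOf p : Int) = (d.keys.length : Int) := by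
        rw [List.idxOf_append_of_notMem hp]
        simp
      rw [hidx, List.append_assoc, List.singleton_append]
      have hcomm : (d.keys.length : Int) + 1 = 1 + (d.keys.length : Int) := by ring
      rw [hcomm]

-- A's first pass builds a dict whose keys are the distinct pairs in first-seen order
lemma passA_keys (ps : List (String × String)) :
    (ps.foldl (fun (d : PySem.Dict (String × String) Int) p => d.insert p 0) PySem.Dict.empty).keys
      = PySem.Set.ofList ps := by
  rw [PySem.Dict.keys_foldl_insert]
  simp [PySem.Set.update_nil_left]

-- A's third pass is a map over the instance keys
lemma foldl_append_getD (f : String → String × String) (D : PySem.Dict (String × String) Int)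
    (ks : List String) :
    ks.foldl (fun acc key => acc ++ [D.getD (f key) 0]) [] = ks.map (fun key => D.getD (f key) 0) := by
  simpa using PySem.List.foldl_append_singleton_eq_map (fun key => D.getD (f key) 0) ks []

-- the two ports agree, for any pair-extraction function f
lemma both_eq_gen (f : String → String × String) (ks : List String) :
    (ks.foldl (fun acc key =>
        acc ++ [((ks.foldl (fun (d : PySem.Dict (String × String) Int) key => d.insert (f key) 0) PySem.Dict.empty).keys.foldl
            (fun (st : PySem.Dict (String × String) Int × Int) k => (st.1.insert k st.2, st.2 + 1))
            (ks.foldl (fun (d : PySem.Dict (String × String) Int) key => d.insert (f key) 0) PySem.Dict.empty, 1)).1.getD (f key) 0]) [])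
    = (ks.foldl (fun (st : PySem.Dict (String × String) Int × Int × List Int) key =>
        match st.1.get? (f key) with
        | some n => (st.1, st.2.1, st.2.2 ++ [n])
        | none => (st.1.insert (f key) st.2.1, st.2.1 + 1, st.2.2 ++ [st.2.1]))
      (PySem.Dict.empty, 1, [])).2.2 := by
  have hA1 : ks.foldl (fun (d : PySem.Dict (String × String) Int) key => d.insert (f key) 0) PySem.Dict.empty
      = (ks.map f).foldl (fun (d : PySem.Dict (String × String) Int) p => d.insert p 0) PySem.Dict.empty :=
    (List.foldl_map (f := f) (g := fun (d : PySem.Dict (String × String) Int) p => d.insert p 0)).symm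
  have hB : ks.foldl (fun (st : PySem.Dict (String × String) Int × Int × List Int) key =>
        match st.1.get? (f key) with
        | some n => (st.1, st.2.1, st.2.2 ++ [n])
        | none => (st.1.insert (f key) st.2.1, st.2.1 + 1, st.2.2 ++ [st.2.1]))
      (PySem.Dict.empty, 1, [])
      = (ks.map f).foldl (fun (st : PySem.Dict (String × String) Int × Int × List Int) p =>
        match st.1.get? p with
        | some n => (st.1, st.2.1, st.2.2 ++ [n])
        | none => (st.1.insert p st.2.1, st.2.1 + 1, st.2.2 ++ [st.2.1]))
      (PySem.Dict.empty, 1, []) :=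
    (List.foldl_map (f := f) (g := fun (st : PySem.Dict (String × String) Int × Int × List Int) p =>
        match st.1.get? p with
        | some n => (st.1, st.2.1, st.2.2 ++ [n])
        | none => (st.1.insert p st.2.1, st.2.1 + 1, st.2.2 ++ [st.2.1]))).symm
  rw [hA1, hB]
  set K1 := (ks.map f).foldl (fun (d : PySem.Dict (String × String) Int) p => d.insert p 0) PySem.Dict.empty with hK1
  have hkeys : K1.keys = PySem.Set.ofList (ks.map f) := passA_keys (ks.map f)
  have hknd : K1.keys.Nodup := by
    rw [hkeys]; exact PySem.Set.nodup_ofList (ks.map f)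
  set PND2 := (K1.keys.foldl
      (fun (st : PySem.Dict (String × String) Int × Int) k => (st.1.insert k st.2, st.2 + 1)) (K1, 1)).1 with hP
  have hval : ∀ p ∈ K1.keys, PND2.getD p 0 = 1 + (K1.keys.idxOf p : Int) := by
    intro p hp
    rw [hP, enumerate_getD K1.keys p hknd hp K1 1]
  have halt : ((ks.map f).foldl (fun (st : PySem.Dict (String × String) Int × Int × List Int) p =>
        match st.1.get? p with
        | some n => (st.1, st.2.1, st.2.2 ++ [n])
        | none => (st.1.insert p st.2.1, st.2.1 + 1, st.2.2 ++ [st.2.1]))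
      ((PySem.Dict.empty : PySem.Dict (String × String) Int), 1, [])).2.2
      = [] ++ (ks.map f).map (fun p => 1 + ((PySem.Set.ofList (ks.map f)).idxOf p : Int)) :=
    alt_loop (ks.map f) PySem.Dict.empty []
      (by simp [PySem.Dict.keys_empty]) (by simp [PySem.Dict.keys_empty])
  rw [foldl_append_getD f PND2 ks, halt]
  simp only [List.nil_append, List.map_map]
  apply List.map_congr_left
  intro key hk
  have hmem : f key ∈ K1.keys := by
    rw [hkeys]
    exact (PySem.Set.mem_ofList (ks.map f) (f key)).mpr (List.mem_map.mpr ⟨key, hk, rfl⟩)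
  rw [hval (f key) hmem, hkeys]
  rfl

-- the two ports agree
lemma both_eq (set_dict : List (String × List (String × String × String))) (instance_keys : List String) :
    stratified_gene_pair_groups set_dict instance_keys
      = stratified_gene_pair_groups_alt set_dict instance_keys :=
  both_eq_gen (fun key => (pvLookupPair? set_dict key).getD ("", "")) instance_keys

-- ===== VERDICT (by name: the statement is the Claim_ definition above) =====
theorem stratified_gene_pair_groups_spec : Claim_equal_stratified_gene_pair_groups := by
  intro set_dict instance_keys _ _
  unfold Spec_stratified_gene_pair_groups
  exact both_eq set_dict instance_keys
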